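-- pv_equiv track=rewrite | github.com/IqbalLx/indonesian-news-extrator | ner.py | postpro
-- ===== SOURCE A (Python) =====
-- def postpro(entities):
--     selected_type = ["ORG", "PER"]
--     date_type = "DTE"
--
--     used_name = set()
--
--     qualified_entities = []
--     date_entities = []
--     for entity in entities:
--         entity_type = entity.get("type")
--         entity_name = entity.get("name")
--         if entity_type in selected_type:
--             if entity_name not in used_name:
--                 qualified_entities.append(entity)
--
--         elif entity_type == date_type:
--             if entity_name not in used_name:
--                 date_entities.append(entity_name)
--
--         used_name.add(entity_name)
--
--     return qualified_entities, date_entities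
-- ===== SOURCE B (Python) =====
-- def postpro(entities):
--     # pass 1: ordered index of first entity per name (dedup over ALL names, incl. None)
--     index = {}
--     for entity in entities:
--         name = entity.get("name")
--         if name not in index:
--             index[name] = entity
--     # pass 2: classify the surviving first occurrences in order
--     qualified_entities = []
--     date_entities = []
--     for entity in index.values():
--         entity_type = entity.get("type")
--         if entity_type in ("ORG", "PER"):
--             qualified_entities.append(entity)
--         elif entity_type == "DTE":
--             date_entities.append(entity.get("name"))
--     return qualified_entities, date_entities
-- ===== Notes on version B (the rewrite author's own statement) =====
-- stated objective: alternative
-- what changed: A's single fused loop (dedup set + two conditional appends per entity) is split into two passes: an ordered index mapping each name to its first entity, then a classification loop over the surviving first occurrences.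
-- outside the precondition, e.g. on postpro([{'type': 'DTE'}]): A returns ([], [None]), B returns ([], [None])
import Mathlib
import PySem

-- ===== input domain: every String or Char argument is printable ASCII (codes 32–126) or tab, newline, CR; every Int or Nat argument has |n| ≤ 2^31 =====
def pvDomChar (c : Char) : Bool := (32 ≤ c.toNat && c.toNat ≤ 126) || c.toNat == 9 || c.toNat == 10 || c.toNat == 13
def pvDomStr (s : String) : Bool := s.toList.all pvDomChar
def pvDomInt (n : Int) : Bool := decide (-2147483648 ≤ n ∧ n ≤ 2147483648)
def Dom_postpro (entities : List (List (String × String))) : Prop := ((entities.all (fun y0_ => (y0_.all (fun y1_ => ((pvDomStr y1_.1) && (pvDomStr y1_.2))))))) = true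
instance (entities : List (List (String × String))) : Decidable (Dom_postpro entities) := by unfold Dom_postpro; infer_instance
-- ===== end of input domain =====

-- B splits A's fused dedup+classify loop into an index-building pass (first entity per name)
-- followed by a classification pass over the survivors; objective: alternative decomposition, same cost.

-- shared primitive: entity.get(k) on a dict given as its association list (first match; exact)
def pyDictGet? (e : List (String × String)) (k : String) : Option String :=
  (PySem.Dict.mk e).get? k

-- ===== PORT A =====
-- A's single loop: set of used names, two accumulators; `used_name.add` runs on EVERY entity.
-- In the DTE branch A appends entity.get("name"); under Pre_postpro it is `some`, so `.getD ""` is exact there.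
def postproLoop (es : List (List (String × String))) (used : PySem.Set (Option String))
    (qs : List (List (String × String))) (ds : List String) :
    (List (List (String × String))) × List String :=
  match es with
  | [] => (qs, ds)
  | e :: rest =>
    let t := pyDictGet? e "type"
    let n := pyDictGet? e "name"
    if t = some "ORG" ∨ t = some "PER" then
      if PySem.Set.contains used n then postproLoop rest (PySem.Set.add used n) qs ds
      else postproLoop rest (PySem.Set.add used n) (qs ++ [e]) ds
    else if t = some "DTE" then
      if PySem.Set.contains used n then postproLoop rest (PySem.Set.add used n) qs ds
      else postproLoop rest (PySem.Set.add used n) qs (ds ++ [n.getD ""])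
    else postproLoop rest (PySem.Set.add used n) qs ds

def postpro (entities : List (List (String × String))) : (List (List (String × String))) × List String :=
  postproLoop entities PySem.Set.empty [] []

-- ===== PORT B =====
-- pass 1: ordered index name -> first entity with that name
def indexLoop (es : List (List (String × String)))
    (d : PySem.Dict (Option String) (List (String × String))) :
    PySem.Dict (Option String) (List (String × String)) :=
  match es with
  | [] => d
  | e :: rest =>
    let n := pyDictGet? e "name"
    indexLoop rest (if PySem.Dict.contains d n then d else PySem.Dict.insert d n e)

-- pass 2: classify the surviving first occurrences in insertion order
-- (in the DTE branch B appends entity.get("name"); under Pre_postpro it is `some`, `.getD ""` exact)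
def classifyLoop (vs : List (List (String × String)))
    (qs : List (List (String × String))) (ds : List String) :
    (List (List (String × String))) × List String :=
  match vs with
  | [] => (qs, ds)
  | e :: rest =>
    let t := pyDictGet? e "type"
    if t = some "ORG" ∨ t = some "PER" then classifyLoop rest (qs ++ [e]) ds
    else if t = some "DTE" then classifyLoop rest qs (ds ++ [(pyDictGet? e "name").getD ""])
    else classifyLoop rest qs ds

def postpro_alt (entities : List (List (String × String))) : (List (List (String × String))) × List String :=
  classifyLoop (PySem.Dict.values (indexLoop entities PySem.Dict.empty)) [] []

-- ===== PRECONDITION & SPEC =====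
-- Pre_ excludes inputs where some entity of type "DTE" has no "name" key: there A (and B) put
-- Python's None into date_entities, which is not a String value of the declared return type.
def Pre_postpro (entities : List (List (String × String))) : Prop :=
  ∀ e ∈ entities, pyDictGet? e "type" = some "DTE" → (pyDictGet? e "name").isSome
instance (entities : List (List (String × String))) : Decidable (Pre_postpro entities) := by unfold Pre_postpro; infer_instance

def pvWitness_postpro : (List (List (String × String))) :=
  [[("type", "ORG"), ("name", "acme")], [("type", "DTE"), ("name", "today")],
   [("type", "PER"), ("name", "acme")], [("type", "LOC")]]

def Spec_postpro (entities : List (List (String × String))) (out : (List (List (String × String))) × List String) : Prop := out = postpro_alt entities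
instance (entities : List (List (String × String))) (out : (List (List (String × String))) × List String) : Decidable (Spec_postpro entities out) := by unfold Spec_postpro; infer_instance

-- ===== CLAIM (what is proved, stated in full; the proofs are below) =====
def Claim_equal_postpro : Prop := ∀ (entities : List (List (String × String))), Dom_postpro entities → Pre_postpro entities → Spec_postpro entities (postpro entities)

-- ===== LEMMAS AND PROOFS =====

-- the index pass only ever appends fresh keys, so its items extend the accumulator's items
lemma indexLoop_items_prefix : ∀ (es : List (List (String × String)))
    (d : PySem.Dict (Option String) (List (String × String))),
    ∃ t, (indexLoop es d).items = d.items ++ t := by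
  intro es
  induction es with
  | nil => intro d; exact ⟨[], by simp [indexLoop]⟩
  | cons e rest ih =>
    intro d
    simp only [indexLoop]
    by_cases hc : PySem.Dict.contains d (pyDictGet? e "name") = true
    · simpa [hc] using ih d
    · obtain ⟨t, ht⟩ := ih (PySem.Dict.insert d (pyDictGet? e "name") e)
      refine ⟨(pyDictGet? e "name", e) :: t, ?_⟩
      simp [hc, ht, PySem.Dict.items_insert]

-- core invariant: with used-set and index keys in sync, A's remaining loop equals
-- classifying the yet-to-be-appended survivors of the index pass
lemma main_inv : ∀ (es : List (List (String × String)))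
    (used : PySem.Set (Option String)) (d : PySem.Dict (Option String) (List (String × String)))
    (qs : List (List (String × String))) (ds : List String),
    d.keys.Nodup →
    (∀ m, m ∈ used ↔ PySem.Dict.contains d m = true) →
    postproLoop es used qs ds
      = classifyLoop (((indexLoop es d).values).drop d.size) qs ds := by
  intro es
  induction es with
  | nil =>
    intro used d qs ds _ _
    have hz : List.drop d.size d.values = [] :=
      List.drop_eq_nil_of_le (by simp [PySem.Dict.values, PySem.Dict.size])
    simp [postproLoop, indexLoop, hz, classifyLoop]
  | cons e rest ih =>
    intro used d qs ds hnd hsync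
    simp only [postproLoop, indexLoop]
    by_cases hc : PySem.Dict.contains d (pyDictGet? e "name") = true
    · have hm : pyDictGet? e "name" ∈ used := (hsync _).2 hc
      have hcs : PySem.Set.contains used (pyDictGet? e "name") = true :=
        (PySem.Set.contains_iff _ _).2 hm
      have hadd : PySem.Set.add used (pyDictGet? e "name") = used :=
        PySem.Set.add_of_mem hm
      have := ih used d qs ds hnd hsync
      split_ifs with h1 h2 <;> simp_all
    · have hm : pyDictGet? e "name" ∉ used := fun h => hc ((hsync _).1 h)
      have hcs : PySem.Set.contains used (pyDictGet? e "name") = false := by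
        simpa using fun h => hm ((PySem.Set.contains_iff _ _).1 h)
      set n := pyDictGet? e "name" with hn
      set d' := PySem.Dict.insert d n e with hd'
      have hnd' : d'.keys.Nodup := PySem.Dict.nodup_keys_insert _ _ _ hnd
      have hsync' : ∀ m, m ∈ PySem.Set.add used n ↔ PySem.Dict.contains d' m = true := by
        intro m
        rw [PySem.Set.mem_add, PySem.Dict.contains_insert]
        constructor
        · rintro (h | rfl)
          · simp [(hsync m).1 h]
          · simp
        · intro h
          rcases Bool.or_eq_true_iff.1 h with h | h
          · exact Or.inr (by simpa using h)
          · exact Or.inl ((hsync m).2 h)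
      -- the survivors list starts with e
      obtain ⟨t, ht⟩ := indexLoop_items_prefix rest d'
      have hitems : d'.items = d.items ++ [(n, e)] := by
        simp [hd', PySem.Dict.items_insert, Bool.eq_false_iff.2 hc]
      have hv : (indexLoop rest d').values
          = (d.items.map Prod.snd ++ [e]) ++ t.map Prod.snd := by
        simp [PySem.Dict.values, ht, hitems]
      have hdropcons :
          ((indexLoop rest d').values).drop d.size
            = e :: ((indexLoop rest d').values).drop d'.size := by
        rw [hv]
        have hA : ((d.items.map Prod.snd ++ [e]) ++ t.map Prod.snd).drop d.size
            = [e] ++ t.map Prod.snd := by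
          rw [List.append_assoc]
          exact List.drop_left' (by simp [PySem.Dict.size])
        have hB : ((d.items.map Prod.snd ++ [e]) ++ t.map Prod.snd).drop d'.size
            = t.map Prod.snd :=
          List.drop_left' (by simp [PySem.Dict.size, hitems])
        rw [hA, hB]
        rfl
      have hstep := ih (PySem.Set.add used n) d' qs ds hnd' hsync'
      have hstepQ := ih (PySem.Set.add used n) d' (qs ++ [e]) ds hnd' hsync'
      have hstepD := ih (PySem.Set.add used n) d' qs (ds ++ [n.getD ""]) hnd' hsync'
      rw [PySem.Set.add_of_not_mem hm] at hstep hstepQ hstepD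
      by_cases h1 : pyDictGet? e "type" = some "ORG" ∨ pyDictGet? e "type" = some "PER"
      · simp [h1, hc, hm, hdropcons, classifyLoop, hstepQ]
      · by_cases h2 : pyDictGet? e "type" = some "DTE"
        · simp [h2, hc, hm, hdropcons, classifyLoop, hstepD, ← hn]
        · simp [h1, h2, hc, hm, hdropcons, classifyLoop, hstep]

-- ===== VERDICT (by name: the statement is the Claim_ definition above) =====
theorem postpro_spec : Claim_equal_postpro := by
  intro entities _ _
  unfold Spec_postpro postpro postpro_alt
  simpa using main_inv entities PySem.Set.empty PySem.Dict.empty [] []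
    (by simp) (by simp)
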